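-- pv_equiv track=rewrite | github.com/ShapeLayer/training | tasks/online_judge/baekjoon/python/28064.wa.py | compute
-- ===== SOURCE A (Python) =====
-- def compute(n: int, names: list[str]):
--     def evaluate(a: str, b: str):
--         length = min(len(a), len(b))
--         result = False
--         for i in range(1, length):
--             if a[:i] == b[-i:]:
--                 result = True
--                 break
--         return result
--     result = 0
--     for i in range(n):
--         for j in range(i):
--             if i == j: continue
--             if evaluate(names[i], names[j]):
--                 result += 1
--     return result
-- ===== SOURCE B (Python) =====
-- def compute(n: int, names: list[str]):
--     # Streaming inverted index: one pass over the names; for each new name count the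
--     # earlier names matched by looking its proper prefixes up in an index of all
--     # proper suffixes seen so far, then register its own suffixes. The quadratic
--     # pairwise loop (and the per-pair scan over overlap lengths) disappears.
--     index = {}   # proper nonempty suffix -> set of indices of earlier names having it
--     total = 0
--     for i in range(n):
--         a = names[i]
--         matched = set()
--         for l in range(1, len(a)):
--             matched |= index.get(a[:l], set())
--         total += len(matched)
--         for l in range(1, len(a)):
--             index.setdefault(a[len(a) - l:], set()).add(i)
--     return total
-- ===== Notes on version B (the rewrite author's own statement) =====
-- stated objective: faster
-- what changed: The quadratic pairwise loop with a per-pair scan over all overlap lengths is replaced by a single streaming pass: an inverted index (proper suffix -> set of earlier indices) is grown name by name, and each new name counts its matches by looking its proper prefixes up in that index, so the inner loop over earlier names and the per-pair length scan both disappear.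
import Mathlib
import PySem

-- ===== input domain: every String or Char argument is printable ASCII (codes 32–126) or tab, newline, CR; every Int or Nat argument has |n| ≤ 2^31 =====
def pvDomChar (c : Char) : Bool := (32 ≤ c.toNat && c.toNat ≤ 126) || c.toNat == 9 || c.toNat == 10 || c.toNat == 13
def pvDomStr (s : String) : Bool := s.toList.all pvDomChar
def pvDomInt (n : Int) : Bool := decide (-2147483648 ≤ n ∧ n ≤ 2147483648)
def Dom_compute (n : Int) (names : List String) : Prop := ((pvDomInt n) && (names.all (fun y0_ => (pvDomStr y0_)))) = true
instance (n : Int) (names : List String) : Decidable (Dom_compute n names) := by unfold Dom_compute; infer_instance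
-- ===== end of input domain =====

-- B replaces A's quadratic pairwise loop by ONE streaming pass: an inverted index
-- (proper suffix -> set of earlier indices) is grown name by name, and each new name
-- counts its matches by looking its proper prefixes up in the index (same return value).

-- ===== PORT A =====
-- A's inner loop 'for i in range(1, length)' with break: first hit wins, else False.
def evalLoopA (a b : String) : List Int → Bool
  | [] => false
  | i :: rest =>
      if PySem.Str.slice a none (some i) = PySem.Str.slice b (some (-i)) none then true
      else evalLoopA a b rest

def evaluateA (a b : String) : Bool :=
  evalLoopA a b (PySem.List.pyRange 1 (min (PySem.Str.len a) (PySem.Str.len b)))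

-- names[i] ported as pyGetD with a default: exact under Pre_compute (all touched indices in range).
def compute (n : Int) (names : List String) : Int :=
  (PySem.List.pyRange 0 n).foldl (fun result i =>
    (PySem.List.pyRange 0 i).foldl (fun result j =>
      if i = j then result
      else if evaluateA (PySem.List.pyGetD names i "") (PySem.List.pyGetD names j "") then
        result + 1
      else result) result) 0

-- ===== PORT B =====
-- a[:l]
def prefKey (a : String) (l : Int) : String := PySem.Str.slice a none (some l)
-- a[len(a)-l:]
def suffKey (a : String) (l : Int) : String :=
  PySem.Str.slice a (some (PySem.Str.len a - l)) none

-- matched = set(); for l in range(1, len(a)): matched |= index.get(a[:l], set())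
def gatherMatched (d : PySem.Dict String (PySem.Set Int)) (a : String) : PySem.Set Int :=
  (PySem.List.pyRange 1 (PySem.Str.len a)).foldl
    (fun m l => PySem.Set.union m (PySem.Dict.getD d (prefKey a l) PySem.Set.empty))
    PySem.Set.empty

-- for l in range(1, len(a)): index.setdefault(a[len(a)-l:], set()).add(i)
def addSuffixes (d : PySem.Dict String (PySem.Set Int)) (a : String) (i : Int) :
    PySem.Dict String (PySem.Set Int) :=
  (PySem.List.pyRange 1 (PySem.Str.len a)).foldl
    (fun d l =>
      PySem.Dict.insert d (suffKey a l)
        (PySem.Set.add (PySem.Dict.getD d (suffKey a l) PySem.Set.empty) i)) d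

-- loop body of the single pass (state = (index, total))
def stepB (names : List String) (st : PySem.Dict String (PySem.Set Int) × Int) (i : Int) :
    PySem.Dict String (PySem.Set Int) × Int :=
  let a := PySem.List.pyGetD names i ""
  (addSuffixes st.1 a i, st.2 + PySem.Set.len (gatherMatched st.1 a))

def compute_alt (n : Int) (names : List String) : Int :=
  ((PySem.List.pyRange 0 n).foldl (stepB names) (PySem.Dict.empty, 0)).2

-- ===== PRECONDITION & SPEC =====
-- Pre_ excludes only n > len(names), where Python A raises IndexError at names[i] (B raises there too).
def Pre_compute (n : Int) (names : List String) : Prop := n ≤ (names.length : Int)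
instance (n : Int) (names : List String) : Decidable (Pre_compute n names) := by
  unfold Pre_compute; infer_instance

def pvWitness_compute : Int × List String := (3, ["ab", "ba", "cab"])

def Spec_compute (n : Int) (names : List String) (out : Int) : Prop := out = compute_alt n names
instance (n : Int) (names : List String) (out : Int) : Decidable (Spec_compute n names out) := by
  unfold Spec_compute; infer_instance

-- ===== CLAIM (what is proved, stated in full; the proofs are below) =====
def Claim_equal_compute : Prop := ∀ (n : Int) (names : List String),
  Dom_compute n names → Pre_compute n names → Spec_compute n names (compute n names)

-- ===== LEMMAS AND PROOFS =====


theorem mem_foldl_union (L : List Int) (g : Int → PySem.Set Int) (init : PySem.Set Int) (j : Int) :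
    j ∈ L.foldl (fun m l => PySem.Set.union m (g l)) init ↔ j ∈ init ∨ ∃ l ∈ L, j ∈ g l := by
  induction L generalizing init with
  | nil => simp
  | cons x L ih =>
      simp only [List.foldl_cons, ih, PySem.Set.mem_union, List.mem_cons]
      constructor
      · rintro ((h | h) | ⟨l, hl, hj⟩)
        · exact Or.inl h
        · exact Or.inr ⟨x, Or.inl rfl, h⟩
        · exact Or.inr ⟨l, Or.inr hl, hj⟩
      · rintro (h | ⟨l, (rfl | hl), hj⟩)
        · exact Or.inl (Or.inl h)
        · exact Or.inl (Or.inr hj)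
        · exact Or.inr ⟨l, hl, hj⟩

theorem nodup_foldl_union (L : List Int) (g : Int → PySem.Set Int) (init : PySem.Set Int)
    (h : init.Nodup) : (L.foldl (fun m l => PySem.Set.union m (g l)) init).Nodup := by
  induction L generalizing init with
  | nil => exact h
  | cons x L ih => exact ih _ (PySem.Set.nodup_union _ _ h)

theorem getD_foldl_insertAdd (key : Int → String) (i j : Int) (p : String) (L : List Int)
    (d : PySem.Dict String (PySem.Set Int)) :
    (j ∈ (L.foldl (fun d l =>
        PySem.Dict.insert d (key l) (PySem.Set.add (PySem.Dict.getD d (key l) PySem.Set.empty) i)) d).getD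
        p PySem.Set.empty) ↔
      j ∈ d.getD p PySem.Set.empty ∨ (j = i ∧ ∃ l ∈ L, p = key l) := by
  induction L generalizing d with
  | nil => simp
  | cons x L ih =>
      simp only [List.foldl_cons, ih, PySem.Dict.getD_insert, List.mem_cons]
      by_cases hp : p = key x
      · subst hp
        aesop
      · simp only [if_neg hp]
        aesop

theorem nodup_getD_foldl_insertAdd (key : Int → String) (i : Int) (L : List Int)
    (d : PySem.Dict String (PySem.Set Int))
    (h : ∀ q, (PySem.Dict.getD d q PySem.Set.empty).Nodup) :
    ∀ q, ((L.foldl (fun d l =>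
        PySem.Dict.insert d (key l) (PySem.Set.add (PySem.Dict.getD d (key l) PySem.Set.empty) i)) d).getD
        q PySem.Set.empty).Nodup := by
  induction L generalizing d with
  | nil => exact h
  | cons x L ih =>
      refine ih _ (fun q => ?_)
      rw [PySem.Dict.getD_insert]
      split_ifs with hq
      · exact PySem.Set.nodup_add _ _ (h _)
      · exact h _

-- A's break-loop is an existence check over the candidate overlap lengths.
theorem evalLoopA_eq_any (a b : String) (l : List Int) :
    evalLoopA a b l = l.any
      (fun i => decide (PySem.Str.slice a none (some i) = PySem.Str.slice b (some (-i)) none)) := by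
  induction l with
  | nil => rfl
  | cons x rest ih =>
      by_cases h : PySem.Str.slice a none (some x) = PySem.Str.slice b (some (-x)) none
      · simp [evalLoopA, h]
      · simp [evalLoopA, h, ih]

theorem toList_prefix_slice (a : String) (k : ℕ) :
    (PySem.Str.slice a none (some (k : Int))).toList = a.toList.take k := by
  rw [PySem.Str.toList_slice, PySem.Chars.slice_eq_listSlice, PySem.List.slice_to _ (by positivity)]
  simp

theorem toList_negsuffix_slice (b : String) (k : ℕ) (hk : 0 < k) :
    (PySem.Str.slice b (some (-(k : Int))) none).toList = b.toList.drop (b.toList.length - k) := by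
  rw [PySem.Str.toList_slice, PySem.Chars.slice_eq_listSlice,
    PySem.List.slice_from_neg_natCast _ k hk]

theorem toList_dropsuffix_slice (b : String) (m : Int) (hm : 0 ≤ m) :
    (PySem.Str.slice b (some m) none).toList = b.toList.drop m.toNat := by
  rw [PySem.Str.toList_slice, PySem.Chars.slice_eq_listSlice, PySem.List.slice_from _ hm]

-- Core per-pair fact: A's scan succeeds iff some proper nonempty prefix of a equals
-- some proper nonempty suffix of b (the two witness lengths are forced to coincide).
theorem eval_iff_exists (a b : String) :
    evaluateA a b = true ↔
      ∃ l : Int, 1 ≤ l ∧ l < PySem.Str.len a ∧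
        ∃ l' : Int, 1 ≤ l' ∧ l' < PySem.Str.len b ∧ prefKey a l = suffKey b l' := by
  rw [evaluateA, evalLoopA_eq_any]
  simp only [List.any_eq_true, decide_eq_true_eq, PySem.List.mem_pyRange_one, prefKey, suffKey,
    PySem.Str.len_eq, lt_min_iff]
  constructor
  · rintro ⟨i, ⟨hi1, hia, hib⟩, heq⟩
    obtain ⟨k, rfl⟩ : ∃ k : ℕ, i = (k : Int) := ⟨i.toNat, by omega⟩
    have hk : 0 < k := by exact_mod_cast hi1
    refine ⟨(k : Int), hi1, hia, (k : Int), hi1, hib, ?_⟩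
    rw [heq]
    apply String.toList_inj.mp
    rw [toList_negsuffix_slice _ _ hk, toList_dropsuffix_slice _ _ (by omega)]
    congr 1
    omega
  · rintro ⟨l, hl1, hla, l', hl'1, hl'b, heq⟩
    obtain ⟨k, rfl⟩ : ∃ k : ℕ, l = (k : Int) := ⟨l.toNat, by omega⟩
    obtain ⟨k', rfl⟩ : ∃ k : ℕ, l' = (k : Int) := ⟨l'.toNat, by omega⟩
    have hka : k < a.toList.length := by exact_mod_cast hla
    have hk'b : k' < b.toList.length := by exact_mod_cast hl'b
    have hkk : k = k' := by
      have h1 := congrArg (fun s => s.toList.length) heq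
      simp only [toList_prefix_slice] at h1
      rw [toList_dropsuffix_slice _ _ (by omega)] at h1
      simp only [List.length_take, List.length_drop] at h1
      omega
    subst hkk
    refine ⟨(k : Int), ⟨hl1, hla, by exact_mod_cast hk'b⟩, ?_⟩
    apply String.toList_inj.mp
    rw [toList_negsuffix_slice _ _ (by exact_mod_cast hl1)]
    have h2 := congrArg String.toList heq
    rw [toList_dropsuffix_slice _ _ (by omega)] at h2
    have h3 : ((b.toList.length : Int) - (k : Int)).toNat = b.toList.length - k := by omega
    rw [h3] at h2
    exact h2

-- membership in the index after registering the suffixes of a for index i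
theorem mem_getD_addSuffixes (d : PySem.Dict String (PySem.Set Int)) (a : String) (i j : Int)
    (p : String) :
    (j ∈ PySem.Dict.getD (addSuffixes d a i) p PySem.Set.empty) ↔
      j ∈ PySem.Dict.getD d p PySem.Set.empty ∨
        (j = i ∧ ∃ l : Int, 1 ≤ l ∧ l < PySem.Str.len a ∧ p = suffKey a l) := by
  rw [addSuffixes, getD_foldl_insertAdd]
  simp only [PySem.List.mem_pyRange_one]
  aesop

theorem nodup_getD_addSuffixes (d : PySem.Dict String (PySem.Set Int)) (a : String) (i : Int)
    (h : ∀ q, (PySem.Dict.getD d q PySem.Set.empty).Nodup) :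
    ∀ q, (PySem.Dict.getD (addSuffixes d a i) q PySem.Set.empty).Nodup := by
  rw [addSuffixes]
  exact nodup_getD_foldl_insertAdd _ _ _ _ h

theorem mem_gatherMatched (d : PySem.Dict String (PySem.Set Int)) (a : String) (j : Int) :
    j ∈ gatherMatched d a ↔
      ∃ l : Int, 1 ≤ l ∧ l < PySem.Str.len a ∧
        j ∈ PySem.Dict.getD d (prefKey a l) PySem.Set.empty := by
  rw [gatherMatched, mem_foldl_union]
  simp only [PySem.List.mem_pyRange_one]
  aesop

theorem nodup_gatherMatched (d : PySem.Dict String (PySem.Set Int)) (a : String) :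
    (gatherMatched d a).Nodup := by
  exact nodup_foldl_union _ _ _ List.nodup_nil

-- the invariant carried through the single pass: the index knows exactly the proper
-- nonempty suffixes of the first m names, each mapped to a duplicate-free set
def IndexInv (names : List String) (m : Int) (d : PySem.Dict String (PySem.Set Int)) : Prop :=
  (∀ p j, j ∈ PySem.Dict.getD d p PySem.Set.empty ↔
      (0 ≤ j ∧ j < m ∧ ∃ l : Int, 1 ≤ l ∧
        l < PySem.Str.len (PySem.List.pyGetD names j "") ∧
        p = suffKey (PySem.List.pyGetD names j "") l)) ∧
  (∀ p, (PySem.Dict.getD d p PySem.Set.empty).Nodup)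

theorem IndexInv_zero (names : List String) : IndexInv names 0 PySem.Dict.empty := by
  constructor
  · intro p j
    simp only [PySem.Dict.getD_empty]
    constructor
    · intro h; cases h
    · rintro ⟨_, h2, _⟩; omega
  · intro p
    simp only [PySem.Dict.getD_empty]
    exact List.nodup_nil

theorem IndexInv_step (names : List String) (m : Int) (d : PySem.Dict String (PySem.Set Int))
    (hm : 0 ≤ m) (h : IndexInv names m d) :
    IndexInv names (m + 1) (addSuffixes d (PySem.List.pyGetD names m "") m) := by
  obtain ⟨hmem, hnd⟩ := h
  constructor
  · intro p j
    rw [mem_getD_addSuffixes, hmem]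
    constructor
    · rintro (⟨h1, h2, hex⟩ | ⟨rfl, hex⟩)
      · exact ⟨h1, by omega, hex⟩
      · exact ⟨hm, by omega, hex⟩
    · rintro ⟨h1, h2, hex⟩
      by_cases hjm : j = m
      · subst hjm; exact Or.inr ⟨rfl, hex⟩
      · exact Or.inl ⟨h1, by omega, hex⟩
  · exact nodup_getD_addSuffixes _ _ _ hnd

theorem nodup_pyRange_zero (i : Int) : (PySem.List.pyRange 0 i).Nodup := by
  rcases (by omega : 0 ≤ i ∨ i < 0) with hi | hi
  · obtain ⟨k, rfl⟩ := Int.eq_ofNat_of_zero_le hi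
    rw [PySem.List.pyRange_zero_natCast]
    exact (List.nodup_range).map (fun x y h => by exact_mod_cast h)
  · have : PySem.List.pyRange 0 i = [] := by
      refine List.eq_nil_iff_forall_not_mem.mpr (fun x hx => ?_)
      rw [PySem.List.mem_pyRange_one] at hx; omega
    rw [this]; exact List.nodup_nil

-- under the invariant, the size of the matched set is exactly A's inner count
theorem count_eq (names : List String) (i : Int) (d : PySem.Dict String (PySem.Set Int))
    (_hi : 0 ≤ i) (h : IndexInv names i d) :
    PySem.Set.len (gatherMatched d (PySem.List.pyGetD names i "")) =
      ((PySem.List.pyRange 0 i).countP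
        (fun j => evaluateA (PySem.List.pyGetD names i "") (PySem.List.pyGetD names j "")) : Int) := by
  obtain ⟨hmem, -⟩ := h
  have hperm : (gatherMatched d (PySem.List.pyGetD names i "")).Perm
      ((PySem.List.pyRange 0 i).filter
        (fun j => evaluateA (PySem.List.pyGetD names i "") (PySem.List.pyGetD names j ""))) := by
    rw [List.perm_ext_iff_of_nodup (nodup_gatherMatched _ _) ((nodup_pyRange_zero i).filter _)]
    intro j
    rw [mem_gatherMatched, List.mem_filter, PySem.List.mem_pyRange_one]
    constructor
    · rintro ⟨l, hl1, hla, hj⟩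
      rw [hmem] at hj
      obtain ⟨hj0, hji, l', hl'1, hl'b, hp⟩ := hj
      exact ⟨⟨hj0, hji⟩, (eval_iff_exists _ _).mpr ⟨l, hl1, hla, l', hl'1, hl'b, hp⟩⟩
    · rintro ⟨⟨hj0, hji⟩, hev⟩
      obtain ⟨l, hl1, hla, l', hl'1, hl'b, hp⟩ := (eval_iff_exists _ _).mp hev
      exact ⟨l, hl1, hla, (hmem _ _).mpr ⟨hj0, hji, l', hl'1, hl'b, hp⟩⟩
  simp only [PySem.Set.len]
  rw [hperm.length_eq, ← List.countP_eq_length_filter]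

theorem main_fold (names : List String) (k : ℕ) :
    IndexInv names (k : Int)
        ((PySem.List.pyRange 0 (k : Int)).foldl (stepB names) (PySem.Dict.empty, 0)).1 ∧
      ((PySem.List.pyRange 0 (k : Int)).foldl (stepB names) (PySem.Dict.empty, 0)).2 =
        (PySem.List.pyRange 0 (k : Int)).foldl (fun result i =>
          (PySem.List.pyRange 0 i).foldl (fun result j =>
            if i = j then result
            else if evaluateA (PySem.List.pyGetD names i "") (PySem.List.pyGetD names j "") then
              result + 1
            else result) result) 0 := by
  induction k with
  | zero =>
      exact ⟨IndexInv_zero names, rfl⟩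
  | succ k ih =>
      have hcast : ((k + 1 : ℕ) : Int) = (k : Int) + 1 := by push_cast; ring
      have hk0 : (0 : Int) ≤ (k : Int) := Int.natCast_nonneg k
      rw [hcast, PySem.List.pyRange_one_succ_right hk0, List.foldl_append, List.foldl_append]
      simp only [List.foldl_cons, List.foldl_nil]
      obtain ⟨h1, h2⟩ := ih
      refine ⟨?_, ?_⟩
      · simp only [stepB]
        exact IndexInv_step names _ _ hk0 h1
      · simp only [stepB]
        have hA : ∀ init : Int,
            List.foldl (fun result j =>
              if (k : Int) = j then result
              else if evaluateA (PySem.List.pyGetD names (k : Int) "")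
                  (PySem.List.pyGetD names j "") then result + 1
              else result) init (PySem.List.pyRange 0 (k : Int)) =
            init + ((PySem.List.pyRange 0 (k : Int)).countP
              (fun j => evaluateA (PySem.List.pyGetD names (k : Int) "")
                (PySem.List.pyGetD names j "")) : Int) := by
          intro init
          rw [PySem.List.foldl_congr_mem _ _
            (fun result j =>
              if evaluateA (PySem.List.pyGetD names (k : Int) "")
                  (PySem.List.pyGetD names j "") then result + 1
              else result) _ ?_]
          · exact PySem.List.foldl_if_add_one _ _ _
          · intro acc x hx
            rw [PySem.List.mem_pyRange_one] at hx
            rw [if_neg (by omega : ¬ (k : Int) = x)]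
        rw [hA, count_eq names (k : Int) _ hk0 h1, h2]

theorem main_eq (n : Int) (names : List String) : compute n names = compute_alt n names := by
  by_cases hn : 0 ≤ n
  · obtain ⟨k, rfl⟩ := Int.eq_ofNat_of_zero_le hn
    unfold compute compute_alt
    exact ((main_fold names k).2).symm
  · have hnil : PySem.List.pyRange 0 n = [] := by
      refine List.eq_nil_iff_forall_not_mem.mpr (fun x hx => ?_)
      rw [PySem.List.mem_pyRange_one] at hx; omega
    unfold compute compute_alt
    rw [hnil]
    rfl

-- ===== VERDICT (by name: the statement is the Claim_ definition above) =====
theorem compute_spec : Claim_equal_compute := by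
  intro n names _ _
  unfold Spec_compute
  exact main_eq n names
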